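-- pv_equiv track=rewrite | github.com/MarcTheSpark/marcpy | utilities.py | cyclic_slice
-- ===== SOURCE A (Python) =====
-- def cyclic_slice(l, start, end):
--     # m
--     """
--     takes a slice that loops back to the beginning if end is before start
--     :param l(list): the list to slice
--     :param start(int): start index
--     :param end(int): end index
--     :return: list
--     """
--
--     if end >= start:
--         # start by making both indices positive, since that's easier to handle
--         while start < 0 or end < 0:
--             start += len(l)
--             end += len(l)
--         if end >= start + len(l):
--             out = []
--             while end - start >= len(l):
--                 out.extend(l[start:] + l[:start])
--                 end -= len(l)
--             out += cyclic_slice(l, start, end)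
--             return out
--         else:
--             end = end % len(l)
--             start = start % len(l)
--             if end >= start:
--                 return l[start:end]
--             else:
--                 return l[start:] + l[:end]
--     else:
--         # if the end is before the beginning, we do a backwards slice
--         # basically this means we reverse the list, and recalculate the start and end
--         new_start = len(l)-start-1
--         new_end = len(l)-end-1
--         new_list = list(l)
--         new_list.reverse()
--         return cyclic_slice(new_list, new_start, new_end)
-- ===== SOURCE B (Python) =====
-- def cyclic_slice(l, start, end):
--     """Cyclic slice: element i of the result is l[(start + i) % len(l)]; when end
--     is before start the slice runs backwards, which is the same forward slice
--     taken over the reversed list."""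
--     n = len(l)
--     if end >= start:
--         return [l[i % n] for i in range(start, end)]
--     rl = l[::-1]
--     return [rl[i % n] for i in range(n - start - 1, n - end - 1)]
-- ===== Notes on version B (the rewrite author's own statement) =====
-- stated objective: simpler
-- what changed: Replaces A's recursive normalize/repeat-extend/reverse-and-recurse logic with one modular-index comprehension per direction (the backward case is the forward case over the reversed list); Pre_ excludes only the empty list, on which A loops forever.
-- intended difference: When the slice spans at least one full cycle and its start index lies beyond the list (start >= len(l) forward, start < 0 backward) and the rotation is non-trivial, A's clamped slice l[start:]+l[:start] emits UNROTATED full cycles (e.g. A gives [1,2] for cyclic_slice([1,2],3,5)) while B gives the rotated cyclic elements [2,1] = [l[3%2], l[4%2]], which is what a cyclic slice means. — e.g. on cyclic_slice([1, 2], 3, 5): A returns [1, 2], B returns [2, 1]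
import Mathlib
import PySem

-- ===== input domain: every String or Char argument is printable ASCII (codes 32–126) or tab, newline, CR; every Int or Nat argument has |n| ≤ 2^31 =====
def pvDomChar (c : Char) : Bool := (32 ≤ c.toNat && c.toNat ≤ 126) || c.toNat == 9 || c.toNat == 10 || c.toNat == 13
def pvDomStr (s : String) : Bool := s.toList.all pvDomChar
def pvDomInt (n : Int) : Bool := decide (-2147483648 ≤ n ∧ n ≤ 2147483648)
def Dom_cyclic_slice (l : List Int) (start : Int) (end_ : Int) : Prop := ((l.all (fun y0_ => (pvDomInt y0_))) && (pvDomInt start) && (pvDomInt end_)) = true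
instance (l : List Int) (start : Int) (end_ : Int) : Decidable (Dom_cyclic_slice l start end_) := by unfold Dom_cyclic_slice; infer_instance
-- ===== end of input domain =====

-- B re-implements A's cyclic slice as one modular-index comprehension per direction;
-- the equivalence is about the return value; Pre_ excludes the empty list, on which A never
-- returns; D_ states the inputs on which A's full-cycle chunks come out unrotated.

-- ===== PORT A =====

-- 'while start < 0 or end < 0: start += len(l); end += len(l)'.
-- The 'n ≤ 0' test only makes the recursion total: with n ≤ 0 Python loops forever (excluded by Pre_).
def pvNormLoop (n s e : Int) : Int × Int :=
  if s < 0 ∨ e < 0 then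
    if h : 0 < n then pvNormLoop n (s + n) (e + n) else (s, e)
  else (s, e)
termination_by (-(min s e)).toNat
decreasing_by omega

-- 'while end - start >= len(l): out.extend(l[start:] + l[:start]); end -= len(l)'.
-- The 'n ≤ 0' test only makes the recursion total: with n ≤ 0 Python loops forever (excluded by Pre_).
def pvCycleLoop (l : List Int) (n s e : Int) (out : List Int) : List Int × Int :=
  if n ≤ e - s then
    if h : 0 < n then
      pvCycleLoop l n s (e - n) (out ++ (PySem.List.slice l (some s) none ++ PySem.List.slice l none (some s)))
    else (out, e)
  else (out, e)
termination_by (e - s).toNat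
decreasing_by omega

-- the recursive function itself; fuel only makes the self-recursion structural
-- (on inputs where A returns, the recursion depth is at most 3)
def pvCore (fuel : Nat) (l : List Int) (start end_ : Int) : List Int :=
  match fuel with
  | 0 => []
  | fuel + 1 =>
    if end_ ≥ start then
      let p := pvNormLoop l.length start end_
      let s := p.1
      let e := p.2
      if e ≥ s + l.length then
        let c := pvCycleLoop l l.length s e []
        c.1 ++ pvCore fuel l s c.2
      else
        let e2 := PySem.Int.mod e l.length
        let s2 := PySem.Int.mod s l.length
        if e2 ≥ s2 then PySem.List.slice l (some s2) (some e2)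
        else PySem.List.slice l (some s2) none ++ PySem.List.slice l none (some e2)
    else
      let new_start := l.length - start - 1
      let new_end := l.length - end_ - 1
      pvCore fuel l.reverse new_start new_end

def cyclic_slice (l : List Int) (start : Int) (end_ : Int) : List Int :=
  pvCore 4 l start end_

-- ===== PORT B =====
-- '[l[i % n] for i in range(start, end)]' forward; the backward slice is the same
-- comprehension over rl = l[::-1] with the endpoints mapped through i ↦ n - i - 1.
def cyclic_slice_alt (l : List Int) (start : Int) (end_ : Int) : List Int :=
  if end_ ≥ start then
    (PySem.List.pyRange start end_ 1).map
      (fun i => PySem.List.pyGetD l (PySem.Int.mod i (l.length : Int)) 0)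
  else
    (PySem.List.pyRange ((l.length : Int) - start - 1) ((l.length : Int) - end_ - 1) 1).map
      (fun i => PySem.List.pyGetD l.reverse (PySem.Int.mod i (l.length : Int)) 0)

-- ===== PRECONDITION & SPEC =====
-- Pre_ excludes only the empty list: there A never returns (its normalisation and
-- repeat loops run forever) and B raises ZeroDivisionError.
def Pre_cyclic_slice (l : List Int) (start : Int) (end_ : Int) : Prop := l ≠ []
instance (l : List Int) (start : Int) (end_ : Int) : Decidable (Pre_cyclic_slice l start end_) := by
  unfold Pre_cyclic_slice; infer_instance

def pvWitness_cyclic_slice : List Int × Int × Int := ([1, 2, 3], -4, 8)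

-- When the slice spans at least one full cycle and its effective start t lies beyond the
-- effective list L (forward: start ≥ len(l); backward the slice is read off L = reversed(l)
-- from t = len(l)-start-1, so start < 0) and the rotation of L by t is non-trivial, A's
-- clamped 'l[start:]+l[:start]' emits UNROTATED full cycles (A gives [1,2] for
-- cyclic_slice([1,2],3,5)) while B gives the rotated cyclic elements ([2,1] =
-- [l[3%2], l[4%2]]), which is what a cyclic slice means.
def D_cyclic_slice (l : List Int) (start : Int) (end_ : Int) : Prop :=
  let t := if end_ ≥ start then start else l.length - start - 1
  let L := if end_ ≥ start then l else l.reverse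
  l.length ≤ min t.toNat (end_ - start).natAbs ∧ L.rotate t.toNat ≠ L
instance (l : List Int) (start : Int) (end_ : Int) : Decidable (D_cyclic_slice l start end_) := by
  unfold D_cyclic_slice; infer_instance

def Spec_cyclic_slice (l : List Int) (start : Int) (end_ : Int) (out : List Int) : Prop :=
  ¬ D_cyclic_slice l start end_ → out = cyclic_slice_alt l start end_
instance (l : List Int) (start : Int) (end_ : Int) (out : List Int) : Decidable (Spec_cyclic_slice l start end_ out) := by
  unfold Spec_cyclic_slice; infer_instance

def pvDiffWitness_cyclic_slice : List Int × Int × Int := ([1, 2], 3, 5)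
def pvDiffWitnessOut_cyclic_slice : (List Int) × (List Int) := ([1, 2], [2, 1])

-- ===== CLAIM (what is proved, stated in full; the proofs are below) =====
def Claim_unchanged_cyclic_slice : Prop := ∀ (l : List Int) (start : Int) (end_ : Int), Dom_cyclic_slice l start end_ → Pre_cyclic_slice l start end_ → Spec_cyclic_slice l start end_ (cyclic_slice l start end_)
def Claim_changed_cyclic_slice : Prop := Dom_cyclic_slice (pvDiffWitness_cyclic_slice.1) (pvDiffWitness_cyclic_slice.2.1) (pvDiffWitness_cyclic_slice.2.2) ∧ Pre_cyclic_slice (pvDiffWitness_cyclic_slice.1) (pvDiffWitness_cyclic_slice.2.1) (pvDiffWitness_cyclic_slice.2.2) ∧ D_cyclic_slice (pvDiffWitness_cyclic_slice.1) (pvDiffWitness_cyclic_slice.2.1) (pvDiffWitness_cyclic_slice.2.2) ∧ cyclic_slice (pvDiffWitness_cyclic_slice.1) (pvDiffWitness_cyclic_slice.2.1) (pvDiffWitness_cyclic_slice.2.2) = pvDiffWitnessOut_cyclic_slice.1 ∧ cyclic_slice_alt (pvDiffWitness_cyclic_slice.1) (pvDiffWitness_cyclic_slice.2.1) (pvDiffWitness_cyclic_slice.2.2)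 = pvDiffWitnessOut_cyclic_slice.2 ∧ pvDiffWitnessOut_cyclic_slice.1 ≠ pvDiffWitnessOut_cyclic_slice.2
def Claim_exact_cyclic_slice : Prop := ∀ (l : List Int) (start : Int) (end_ : Int), Dom_cyclic_slice l start end_ → Pre_cyclic_slice l start end_ → D_cyclic_slice l start end_ → cyclic_slice l start end_ ≠ cyclic_slice_alt l start end_

-- ===== LEMMAS AND PROOFS =====

-- rotation of a list by an integer index (proof-side bridge between A's chunk and List.rotate)
def pvRot (l : List Int) (k : Int) : List Int := l.drop k.toNat ++ l.take k.toNat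

-- the canonical cyclic segment [l[i % n] for i in range(a, b)]
def pvF (l : List Int) (a b : Int) : List Int :=
  (PySem.List.pyRange a b 1).map (fun i => PySem.List.pyGetD l (PySem.Int.mod i l.length) 0)

theorem pvNormLoop_spec (n : Int) (hn : 0 < n) (s e : Int) : s ≤ e →
    ∃ k : Nat, pvNormLoop n s e = (s + k * n, e + k * n) ∧ 0 ≤ s + k * n ∧
      (s < 0 → s + k * n < n) ∧ (0 ≤ s → k = 0) := by
  induction s, e using pvNormLoop.induct n with
  | case1 s e hcond hpos ih =>
    intro hse
    obtain ⟨k, hk, h0, hlt, hz⟩ := ih (by omega)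
    have hs : s < 0 := hcond.elim id (fun h => lt_of_le_of_lt hse h)
    have hmul : ((k : Int) + 1) * n = (k : Int) * n + n := by ring
    refine ⟨k + 1, ?_, ?_, fun _ => ?_, fun h => absurd h (by omega)⟩
    · rw [pvNormLoop, if_pos hcond, dif_pos hpos, hk]
      push_cast
      rw [hmul]
      simp only [Prod.mk.injEq]
      exact ⟨by ring, by ring⟩
    · push_cast; omega
    · push_cast
      rcases lt_or_ge (s + n) 0 with h | h
      · have := hlt h; omega
      · have := hz h; subst this; simp at h0 hlt ⊢; omega
  | case2 s e hcond hpos => omega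
  | case3 s e hcond =>
    exact fun _ => ⟨0, by rw [pvNormLoop, if_neg hcond]; simp, by omega, by omega, by omega⟩

theorem pvCycleLoop_spec (l : List Int) (n s : Int) (hn : 0 < n) :
    ∀ e out, s ≤ e →
      pvCycleLoop l n s e out =
        (out ++ (List.replicate (PySem.Int.floordiv (e - s) n).toNat
            (PySem.List.slice l (some s) none ++ PySem.List.slice l none (some s))).flatten,
         s + PySem.Int.mod (e - s) n) := by
  intro e
  induction e, (([] : List Int)) using pvCycleLoop.induct l n s with
  | case1 e out' hc hp ih =>
    intro out hse
    rw [pvCycleLoop, if_pos hc, dif_pos hp, ih _ (by omega)]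
    rw [PySem.Int.floordiv_eq_ediv_of_pos hn, PySem.Int.floordiv_eq_ediv_of_pos hn,
        PySem.Int.mod_eq_emod_of_pos hn, PySem.Int.mod_eq_emod_of_pos hn]
    have hdiv : (e - s) / n = (e - n - s) / n + 1 := by
      have := Int.add_mul_ediv_right (e - n - s) 1 (by omega : n ≠ 0)
      simp at this; rw [← this]; ring_nf
    have hmod : (e - n - s) % n = (e - s) % n := by
      have : e - n - s = (e - s) - n := by ring
      rw [this, Int.sub_emod_right]
    have htn : ((e - s) / n).toNat = ((e - n - s) / n).toNat + 1 := by
      have h0 : 0 ≤ (e - n - s) / n := Int.ediv_nonneg (by omega) (by omega)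
      omega
    rw [hmod, htn, List.replicate_succ, List.flatten_cons]
    simp [List.append_assoc]
  | case2 e out' hc hp => omega
  | case3 e out' hc =>
    intro out hse
    rw [pvCycleLoop, if_neg hc]
    rw [PySem.Int.floordiv_eq_ediv_of_pos hn, PySem.Int.mod_eq_emod_of_pos hn]
    have h1 : (e - s) / n = 0 := Int.ediv_eq_zero_of_lt (by omega) (by omega)
    have h2 : (e - s) % n = e - s := Int.emod_eq_of_lt (by omega) (by omega)
    rw [h1, h2]
    simp

theorem pvF_congr (l : List Int) (hl : l ≠ []) (a a' r : Int)
    (h : a % (l.length : Int) = a' % (l.length : Int)) :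
    pvF l a (a + r) = pvF l a' (a' + r) := by
  have hn : (0 : Int) < l.length := by
    simpa using List.length_pos_iff.mpr hl
  unfold pvF
  rw [PySem.List.pyRange_one, PySem.List.pyRange_one, List.map_map, List.map_map]
  have : (a + r - a).toNat = (a' + r - a').toNat := by omega
  rw [this]
  apply List.map_congr_left
  intro k _
  simp only [Function.comp_apply]
  congr 1
  rw [PySem.Int.mod_eq_emod_of_pos hn, PySem.Int.mod_eq_emod_of_pos hn]
  conv_lhs => rw [Int.add_emod, h, ← Int.add_emod]

theorem pvF_length (l : List Int) (a b : Int) : (pvF l a b).length = (b - a).toNat := by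
  rw [pvF, List.length_map]; exact PySem.List.length_pyRange_one a b

theorem pvF_get (l : List Int) (hl : l ≠ []) (a b : Int) (k : Nat) (hk : k < (b - a).toNat) :
    (pvF l a b)[k]? = some (l.getD ((a + k) % (l.length : Int)).toNat 0) := by
  have hn : (0 : Int) < l.length := by simpa using List.length_pos_iff.mpr hl
  unfold pvF
  rw [List.getElem?_map, PySem.List.getElem?_pyRange_one, if_pos hk]
  simp only [Option.map_some]
  congr 1
  rw [PySem.Int.mod_eq_emod_of_pos hn,
      PySem.List.pyGetD_of_nonneg _ _ (Int.emod_nonneg _ (by omega))]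

theorem pvModBranch_eq (l : List Int) (s e : Int) (hl : l ≠ [])
    (hs : 0 ≤ s) (hse : s ≤ e) (hlt : e < s + l.length) :
    (if PySem.Int.mod e l.length ≥ PySem.Int.mod s l.length then
        PySem.List.slice l (some (PySem.Int.mod s l.length)) (some (PySem.Int.mod e l.length))
      else PySem.List.slice l (some (PySem.Int.mod s l.length)) none ++
        PySem.List.slice l none (some (PySem.Int.mod e l.length))) = pvF l s e := by
  have hn : (0 : Int) < (l.length : Int) := by simpa using List.length_pos_iff.mpr hl
  rw [PySem.Int.mod_eq_emod_of_pos hn, PySem.Int.mod_eq_emod_of_pos hn]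
  set N : Int := (l.length : Int) with hN
  have hs2 : 0 ≤ s % N := Int.emod_nonneg _ (by omega)
  have hs2' : s % N < N := Int.emod_lt_of_pos _ hn
  have he2 : 0 ≤ e % N := Int.emod_nonneg _ (by omega)
  have he2' : e % N < N := Int.emod_lt_of_pos _ hn
  have key : e % N = (s % N + (e - s)) % N := by
    conv_lhs => rw [show e = s + (e - s) by ring]
    rw [Int.emod_add_emod]
  have hr : ((e - s).toNat : Int) = e - s := Int.toNat_of_nonneg (by omega)
  have hrn : (e - s).toNat < l.length := by omega
  split_ifs with hcmp
  · have hb : e % N = s % N + (e - s) := by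
      rcases lt_or_ge (s % N + (e - s)) N with h | h
      · rw [key, Int.emod_eq_of_lt (by omega) h]
      · have : (s % N + (e - s)) % N = s % N + (e - s) - N := by
          rw [← Int.sub_emod_right (s % N + (e - s)) N]
          exact Int.emod_eq_of_lt (by omega) (by omega)
        omega
    rw [PySem.List.slice_toNat _ hs2 he2]
    apply List.ext_getElem?
    intro k
    by_cases hk : k < (e - s).toNat
    · rw [pvF_get l hl s e k hk]
      have hak : (s % N).toNat + k < l.length := by omega
      rw [List.getElem?_take_of_lt (by omega), List.getElem?_drop]
      have hsk : (s + k) % N = s % N + k := by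
        rw [← Int.emod_add_emod]
        exact Int.emod_eq_of_lt (by omega) (by omega)
      rw [hsk, show (s % N + (k : Int)).toNat = (s % N).toNat + k by omega]
      rw [List.getElem?_eq_getElem (by omega : (s % N).toNat + k < l.length),
          List.getD_eq_getElem _ _ (by omega)]
    · rw [List.getElem?_eq_none, List.getElem?_eq_none]
      · rw [pvF_length]; omega
      · rw [List.length_take, List.length_drop]; omega
  · have hb : e % N = s % N + (e - s) - N := by
      rcases lt_or_ge (s % N + (e - s)) N with h | h
      · rw [key, Int.emod_eq_of_lt (by omega) h] at *; omega
      · have : (s % N + (e - s)) % N = s % N + (e - s) - N := by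
          rw [← Int.sub_emod_right (s % N + (e - s)) N]
          exact Int.emod_eq_of_lt (by omega) (by omega)
        omega
    rw [PySem.List.slice_from _ hs2, PySem.List.slice_to _ he2]
    apply List.ext_getElem?
    intro k
    have hlen : (l.drop (s % N).toNat).length = l.length - (s % N).toNat := List.length_drop
    by_cases hk : k < (e - s).toNat
    · rw [pvF_get l hl s e k hk]
      by_cases hk2 : k < l.length - (s % N).toNat
      · rw [List.getElem?_append_left (by omega), List.getElem?_drop]
        have hsk : (s + k) % N = s % N + k := by
          rw [← Int.emod_add_emod]
          exact Int.emod_eq_of_lt (by omega) (by omega)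
        rw [hsk, show (s % N + (k : Int)).toNat = (s % N).toNat + k by omega]
        rw [List.getElem?_eq_getElem (by omega : (s % N).toNat + k < l.length),
            List.getD_eq_getElem _ _ (by omega)]
      · rw [List.getElem?_append_right (by omega)]
        rw [List.getElem?_take_of_lt (by omega)]
        have hsk : (s + k) % N = s % N + k - N := by
          rw [← Int.emod_add_emod, ← Int.sub_emod_right (s % N + k) N]
          exact Int.emod_eq_of_lt (by omega) (by omega)
        rw [hsk, show (s % N + (k : Int) - N).toNat = k - (l.drop (s % N).toNat).length by
              simp only [List.length_drop]; omega]
        rw [List.getElem?_eq_getElem (by simp only [List.length_drop]; omega :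
              k - (l.drop (s % N).toNat).length < l.length),
            List.getD_eq_getElem _ _ (by simp only [List.length_drop]; omega)]
    · rw [List.getElem?_eq_none, List.getElem?_eq_none]
      · rw [pvF_length]; omega
      · rw [List.length_append, List.length_take, List.length_drop]; omega

theorem pvCore_forward (fuel : Nat) (l : List Int) (s e : Int) (hl : l ≠ []) (hse : s ≤ e) :
    pvCore (fuel + 2) l s e =
      (List.replicate (PySem.Int.floordiv (e - s) (l.length : Int)).toNat
          (PySem.List.slice l (some (if s ≥ 0 then s else PySem.Int.mod s l.length)) none ++
           PySem.List.slice l none (some (if s ≥ 0 then s else PySem.Int.mod s l.length)))).flatten ++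
        pvF l s (s + PySem.Int.mod (e - s) (l.length : Int)) := by
  have hn : (0 : Int) < (l.length : Int) := by simpa using List.length_pos_iff.mpr hl
  obtain ⟨k, hk, h0, hlt, hz⟩ := pvNormLoop_spec (l.length : Int) hn s e hse
  set N : Int := (l.length : Int) with hN
  set s1 : Int := s + k * N with hs1def
  set e1 : Int := e + k * N with he1def
  have hse1 : s1 ≤ e1 := by omega
  have hmodeq : s1 % N = s % N := by
    rw [hs1def, Int.add_mul_emod_self_right]
  have hs'eq : s1 = (if s ≥ 0 then s else PySem.Int.mod s N) := by
    split_ifs with h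
    · rw [hs1def, hz h]; norm_num
    · rw [PySem.Int.mod_eq_emod_of_pos hn, ← hmodeq]
      exact (Int.emod_eq_of_lt h0 (hlt (by omega))).symm
  have hdiff : e1 - s1 = e - s := by omega
  rw [show fuel + 2 = (fuel + 1) + 1 by ring]
  rw [pvCore]
  rw [if_pos hse, hk]
  simp only
  by_cases hcyc : e1 ≥ s1 + N
  · rw [if_pos hcyc]
    rw [pvCycleLoop_spec l N s1 (by omega) e1 [] hse1]
    simp only [List.nil_append]
    have hrec : pvCore (fuel + 1) l s1 (s1 + PySem.Int.mod (e1 - s1) N) = pvF l s1 (s1 + PySem.Int.mod (e1 - s1) N) := by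
      have hm0 : 0 ≤ PySem.Int.mod (e1 - s1) N := by
        rw [PySem.Int.mod_eq_emod_of_pos hn]; exact Int.emod_nonneg _ (by omega)
      have hmlt : PySem.Int.mod (e1 - s1) N < N := by
        rw [PySem.Int.mod_eq_emod_of_pos hn]; exact Int.emod_lt_of_pos _ hn
      obtain ⟨k2, hk2, _, _, hz2⟩ := pvNormLoop_spec N hn s1 (s1 + PySem.Int.mod (e1 - s1) N) (by omega)
      rw [hz2 (by omega)] at hk2
      simp at hk2
      rw [pvCore, if_pos (by omega), hk2]
      simp only
      rw [if_neg (by omega)]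
      exact pvModBranch_eq l s1 _ hl (by omega) (by omega) (by omega)
    rw [hrec, hdiff]
    congr 1
    · rw [hs'eq]
    · exact pvF_congr l hl s1 s _ hmodeq
  · rw [if_neg hcyc]
    rw [pvModBranch_eq l s1 e1 hl (by omega) hse1 (by omega)]
    have hflat : (PySem.Int.floordiv (e - s) N).toNat = 0 := by
      rw [PySem.Int.floordiv_eq_ediv_of_pos hn]
      rw [Int.ediv_eq_zero_of_lt (by omega) (by omega)]
      rfl
    have hmod : PySem.Int.mod (e - s) N = e - s := by
      rw [PySem.Int.mod_eq_emod_of_pos hn]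
      exact Int.emod_eq_of_lt (by omega) (by omega)
    rw [hflat, hmod]
    simp only [List.replicate_zero, List.flatten_nil, List.nil_append]
    rw [show e1 = s1 + (e - s) by omega]
    exact pvF_congr l hl s1 s _ hmodeq

-- B's two branches, as pvF
theorem pvAlt_forward (l : List Int) (s e : Int) (h : e ≥ s) :
    cyclic_slice_alt l s e = pvF l s e := by
  rw [cyclic_slice_alt, if_pos h]; rfl

theorem pvAlt_backward (l : List Int) (s e : Int) (h : ¬ e ≥ s) :
    cyclic_slice_alt l s e =
      pvF l.reverse ((l.length : Int) - s - 1) ((l.length : Int) - e - 1) := by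
  rw [cyclic_slice_alt, if_neg h]
  unfold pvF
  simp only [List.length_reverse]

-- range split for pvF
theorem pvF_append (l : List Int) (hl : l ≠ []) (a b c : Int) (h1 : a ≤ b) (h2 : b ≤ c) :
    pvF l a c = pvF l a b ++ pvF l b c := by
  apply List.ext_getElem?
  intro k
  by_cases hk : k < (c - a).toNat
  · rw [pvF_get l hl a c k hk]
    by_cases hk2 : k < (b - a).toNat
    · rw [List.getElem?_append_left (by rw [pvF_length]; omega), pvF_get l hl a b k hk2]
    · rw [List.getElem?_append_right (by rw [pvF_length]; omega), pvF_length,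
          pvF_get l hl b c _ (by omega)]
      have hcast : b + ((k - (b - a).toNat : Nat) : Int) = a + k := by omega
      rw [hcast]
  · rw [List.getElem?_eq_none (by rw [pvF_length]; omega),
        List.getElem?_eq_none (by rw [List.length_append, pvF_length, pvF_length]; omega)]

theorem pvF_cycle (l : List Int) (hl : l ≠ []) (s r : Int) (hr : 0 ≤ r) : ∀ k : Nat,
    pvF l s (s + k * (l.length : Int) + r) =
      (List.replicate k (pvF l s (s + (l.length : Int)))).flatten ++ pvF l s (s + r)
  | 0 => by simp
  | k + 1 => by
    have hn : (0 : Int) < (l.length : Int) := by simpa using List.length_pos_iff.mpr hl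
    have hkn : (0 : Int) ≤ (k : Int) * (l.length : Int) := by positivity
    have hc : ((k : Nat) + 1 : Nat) * ((l.length : Int)) = (k : Int) * l.length + l.length := by
      push_cast; ring
    rw [show s + ((k : Nat) + 1 : Nat) * ((l.length : Int)) + r
          = s + ((k : Int) * l.length + l.length) + r by rw [hc]]
    rw [pvF_append l hl s (s + (l.length : Int)) _ (by omega) (by omega)]
    have hshift : pvF l (s + (l.length : Int)) (s + ((k : Int) * l.length + l.length) + r)
        = pvF l s (s + ((k : Int) * l.length + r)) := by
      have := pvF_congr l hl (s + (l.length : Int)) s ((k : Int) * l.length + r)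
        (by rw [show s + (l.length : Int) = s + (l.length : Int) * 1 by ring,
                Int.add_mul_emod_self_left])
      rw [show s + (l.length : Int) + ((k : Int) * l.length + r)
            = s + ((k : Int) * l.length + l.length) + r by ring] at this
      exact this
    rw [hshift, show s + ((k : Int) * l.length + r) = s + (k : Nat) * (l.length : Int) + r by ring,
        pvF_cycle l hl s r hr k, List.replicate_succ, List.flatten_cons, List.append_assoc]

theorem pvF_decomp (l : List Int) (hl : l ≠ []) (s e : Int) (hse : s ≤ e) :
    pvF l s e =
      (List.replicate (PySem.Int.floordiv (e - s) (l.length : Int)).toNat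
          (pvF l s (s + (l.length : Int)))).flatten ++
        pvF l s (s + PySem.Int.mod (e - s) (l.length : Int)) := by
  have hn : (0 : Int) < (l.length : Int) := by simpa using List.length_pos_iff.mpr hl
  rw [PySem.Int.floordiv_eq_ediv_of_pos hn, PySem.Int.mod_eq_emod_of_pos hn]
  set N : Int := (l.length : Int) with hN
  have hid : N * ((e - s) / N) + (e - s) % N = e - s := Int.ediv_add_emod _ _
  have hq0 : 0 ≤ (e - s) / N := Int.ediv_nonneg (by omega) (by omega)
  have hr0 : 0 ≤ (e - s) % N := Int.emod_nonneg _ (by omega)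
  have hcast : (((e - s) / N).toNat : Int) = (e - s) / N := Int.toNat_of_nonneg hq0
  have hcomm : (e - s) / N * N = N * ((e - s) / N) := mul_comm _ _
  have hkey := pvF_cycle l hl s ((e - s) % N) hr0 ((e - s) / N).toNat
  rw [show s + (((e - s) / N).toNat : Int) * N + (e - s) % N = e from by
        rw [hcast]; linarith [hid, hcomm]] at hkey
  exact hkey

theorem pvRot_length (l : List Int) (a : Int) : (pvRot l a).length = l.length := by
  simp [pvRot]; omega

theorem pvRot_eq_pvF (l : List Int) (hl : l ≠ []) (a : Int)
    (h0 : 0 ≤ a) (h1 : a < (l.length : Int)) :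
    pvRot l a = pvF l a (a + (l.length : Int)) := by
  have hn : (0 : Int) < (l.length : Int) := by simpa using List.length_pos_iff.mpr hl
  apply List.ext_getElem?
  intro k
  by_cases hk : k < l.length
  · rw [pvF_get l hl a _ k (by omega)]
    unfold pvRot
    by_cases hk2 : k < l.length - a.toNat
    · rw [List.getElem?_append_left (by rw [List.length_drop]; omega), List.getElem?_drop]
      have hm : (a + k) % (l.length : Int) = a + k := Int.emod_eq_of_lt (by omega) (by omega)
      rw [hm, show ((a + (k : Int)).toNat) = a.toNat + k by omega]
      rw [List.getElem?_eq_getElem (by omega : a.toNat + k < l.length),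
          List.getD_eq_getElem _ _ (by omega)]
    · rw [List.getElem?_append_right (by rw [List.length_drop]; omega), List.length_drop]
      rw [List.getElem?_take_of_lt (by omega)]
      have hm : (a + k) % (l.length : Int) = a + k - l.length := by
        rw [← Int.sub_emod_right (a + k) (l.length : Int)]
        exact Int.emod_eq_of_lt (by omega) (by omega)
      rw [hm, show ((a + (k : Int) - (l.length : Int)).toNat) = k - (l.length - a.toNat) by omega]
      rw [List.getElem?_eq_getElem (by omega : k - (l.length - a.toNat) < l.length),
          List.getD_eq_getElem _ _ (by omega)]
  · rw [List.getElem?_eq_none (by rw [pvRot_length]; omega),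
        List.getElem?_eq_none (by rw [pvF_length]; omega)]

-- A's full-cycle chunk, in the two regimes of the start index
theorem pvChunk_lt (l : List Int) (hl : l ≠ []) (s : Int) (h : s < (l.length : Int)) :
    PySem.List.slice l (some (if s ≥ 0 then s else PySem.Int.mod s l.length)) none ++
      PySem.List.slice l none (some (if s ≥ 0 then s else PySem.Int.mod s l.length)) =
      pvRot l (PySem.Int.mod s (l.length : Int)) := by
  have hn : (0 : Int) < (l.length : Int) := by simpa using List.length_pos_iff.mpr hl
  have hs1 : (if s ≥ 0 then s else PySem.Int.mod s l.length) = PySem.Int.mod s (l.length : Int) := by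
    split_ifs with h0
    · rw [PySem.Int.mod_eq_emod_of_pos hn, Int.emod_eq_of_lt h0 h]
    · rfl
  rw [hs1]
  have hm0 : 0 ≤ PySem.Int.mod s (l.length : Int) := by
    rw [PySem.Int.mod_eq_emod_of_pos hn]; exact Int.emod_nonneg _ (by omega)
  rw [PySem.List.slice_from _ hm0, PySem.List.slice_to _ hm0]
  rfl

theorem pvChunk_ge (l : List Int) (s : Int) (h : (l.length : Int) ≤ s) :
    PySem.List.slice l (some (if s ≥ 0 then s else PySem.Int.mod s l.length)) none ++
      PySem.List.slice l none (some (if s ≥ 0 then s else PySem.Int.mod s l.length)) = l := by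
  have h0 : s ≥ 0 := le_trans (Int.natCast_nonneg _) h
  rw [if_pos h0, PySem.List.slice_from _ h0, PySem.List.slice_to _ h0]
  rw [List.drop_eq_nil_of_le (by omega), List.take_of_length_le (by omega)]
  simp

theorem pvRot_rotate (l : List Int) (hl : l ≠ []) (t : Int) (ht : 0 ≤ t) :
    pvRot l (PySem.Int.mod t (l.length : Int)) = l.rotate t.toNat := by
  have hn : 0 < l.length := List.length_pos_iff.mpr hl
  have hni : (0 : Int) < (l.length : Int) := by exact_mod_cast hn
  rw [← List.rotate_mod, List.rotate_eq_drop_append_take (Nat.le_of_lt (Nat.mod_lt _ hn))]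
  unfold pvRot
  have hcast : ((t % (l.length : Int)).toNat) = t.toNat % l.length := by
    calc ((t % (l.length : Int)).toNat)
        = (((t.toNat : Int)) % ((l.length : Int))).toNat := by rw [Int.toNat_of_nonneg ht]
      _ = ((((t.toNat % l.length : Nat)) : Int)).toNat := by rw [Int.natCast_mod]
      _ = t.toNat % l.length := Int.toNat_natCast _
  rw [PySem.Int.mod_eq_emod_of_pos hni, hcast]

-- A agrees with the canonical cyclic segment outside the change region (one direction)
theorem pvAgree_core (fuel : Nat) (l : List Int) (s e : Int) (hl : l ≠ []) (hse : s ≤ e)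
    (h : ¬((l.length : Int) ≤ s ∧ (l.length : Int) ≤ e - s ∧
        pvRot l (PySem.Int.mod s (l.length : Int)) ≠ l)) :
    pvCore (fuel + 2) l s e = pvF l s e := by
  have hn : (0 : Int) < (l.length : Int) := by simpa using List.length_pos_iff.mpr hl
  rw [pvCore_forward fuel l s e hl hse, pvF_decomp l hl s e hse]
  by_cases hq : (l.length : Int) ≤ e - s
  · have hchunk : PySem.List.slice l (some (if s ≥ 0 then s else PySem.Int.mod s l.length)) none ++
        PySem.List.slice l none (some (if s ≥ 0 then s else PySem.Int.mod s l.length)) =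
        pvF l s (s + (l.length : Int)) := by
      have hmm : PySem.Int.mod s (l.length : Int) % (l.length : Int) = s % (l.length : Int) := by
        rw [PySem.Int.mod_eq_emod_of_pos hn, Int.emod_emod_of_dvd _ dvd_rfl]
      have hrotF : pvRot l (PySem.Int.mod s (l.length : Int)) = pvF l s (s + (l.length : Int)) := by
        rw [pvRot_eq_pvF l hl _ (by rw [PySem.Int.mod_eq_emod_of_pos hn]; exact Int.emod_nonneg _ (by omega))
              (by rw [PySem.Int.mod_eq_emod_of_pos hn]; exact Int.emod_lt_of_pos _ hn)]
        exact pvF_congr l hl _ s _ hmm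
      by_cases hs : s < (l.length : Int)
      · rw [pvChunk_lt l hl s hs, hrotF]
      · have hrot : pvRot l (PySem.Int.mod s (l.length : Int)) = l := by
          by_contra hc
          exact h ⟨by omega, hq, hc⟩
        rw [pvChunk_ge l s (by omega), ← hrotF]
        exact hrot.symm
    rw [hchunk]
  · have hq0 : (PySem.Int.floordiv (e - s) (l.length : Int)).toNat = 0 := by
      rw [PySem.Int.floordiv_eq_ediv_of_pos hn, Int.ediv_eq_zero_of_lt (by omega) (by omega)]
      rfl
    rw [hq0]
    simp

-- A differs from the canonical cyclic segment everywhere inside the change region (one direction)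
theorem pvDisagree_core (fuel : Nat) (l : List Int) (s e : Int) (hl : l ≠ []) (hse : s ≤ e)
    (h1 : (l.length : Int) ≤ s) (h2 : (l.length : Int) ≤ e - s)
    (h3 : pvRot l (PySem.Int.mod s (l.length : Int)) ≠ l) :
    pvCore (fuel + 2) l s e ≠ pvF l s e := by
  have hn : (0 : Int) < (l.length : Int) := by simpa using List.length_pos_iff.mpr hl
  rw [pvCore_forward fuel l s e hl hse, pvF_decomp l hl s e hse, pvChunk_ge l s h1]
  have hq1 : 1 ≤ (PySem.Int.floordiv (e - s) (l.length : Int)).toNat := by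
    rw [PySem.Int.floordiv_eq_ediv_of_pos hn]
    have : (1 : Int) ≤ (e - s) / (l.length : Int) :=
      Int.le_ediv_of_mul_le hn (by omega)
    omega
  obtain ⟨m, hm⟩ : ∃ m, (PySem.Int.floordiv (e - s) (l.length : Int)).toNat = m + 1 :=
    ⟨(PySem.Int.floordiv (e - s) (l.length : Int)).toNat - 1, by omega⟩
  intro heq
  have htake := congrArg (List.take l.length) heq
  rw [hm, List.replicate_succ, List.replicate_succ, List.flatten_cons, List.flatten_cons,
      List.append_assoc, List.append_assoc] at htake
  rw [List.take_left' rfl, List.take_left' (by rw [pvF_length]; omega)] at htake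
  apply h3
  have hmm : PySem.Int.mod s (l.length : Int) % (l.length : Int) = s % (l.length : Int) := by
    rw [PySem.Int.mod_eq_emod_of_pos hn, Int.emod_emod_of_dvd _ dvd_rfl]
  rw [pvRot_eq_pvF l hl _ (by rw [PySem.Int.mod_eq_emod_of_pos hn]; exact Int.emod_nonneg _ (by omega))
        (by rw [PySem.Int.mod_eq_emod_of_pos hn]; exact Int.emod_lt_of_pos _ hn),
      pvF_congr l hl _ s _ hmm]
  exact htake.symm

-- ===== VERDICT (by name: the statements are the Claim_ definitions above) =====
theorem cyclic_slice_spec : Claim_unchanged_cyclic_slice := by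
  intro l s e _ hpre
  unfold Spec_cyclic_slice
  intro hnd
  have hl : l ≠ [] := hpre
  by_cases hse : e ≥ s
  · have hndf : ¬((l.length : Int) ≤ s ∧ (l.length : Int) ≤ e - s ∧
        pvRot l (PySem.Int.mod s (l.length : Int)) ≠ l) := by
      rintro ⟨h1, h2, h3⟩
      apply hnd
      simp only [D_cyclic_slice]
      rw [if_pos hse, if_pos hse]
      refine ⟨by omega, ?_⟩
      rwa [← pvRot_rotate l hl s (by omega)]
    unfold cyclic_slice
    rw [show (4 : Nat) = 2 + 2 from rfl, pvAgree_core 2 l s e hl (by omega) hndf,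
        pvAlt_forward l s e hse]
  · have hlr : l.reverse ≠ [] := by simpa using hl
    have hn : (0 : Int) < (l.length : Int) := by simpa using List.length_pos_iff.mpr hl
    have hbk : ¬((l.reverse.length : Int) ≤ ((l.length : Int) - s - 1) ∧
        (l.reverse.length : Int) ≤ ((l.length : Int) - e - 1) - ((l.length : Int) - s - 1) ∧
        pvRot l.reverse (PySem.Int.mod ((l.length : Int) - s - 1) (l.reverse.length : Int)) ≠ l.reverse) := by
      rintro ⟨a, b, c⟩
      simp only [List.length_reverse] at a b
      apply hnd
      simp only [D_cyclic_slice]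
      rw [if_neg hse, if_neg hse]
      refine ⟨by omega, ?_⟩
      rwa [← pvRot_rotate l.reverse hlr _ (by omega)]
    unfold cyclic_slice
    rw [show (4 : Nat) = 3 + 1 from rfl, pvCore, if_neg hse]
    simp only
    rw [show (3 : Nat) = 1 + 2 from rfl,
        pvAgree_core 1 l.reverse _ _ hlr (by omega) hbk,
        pvAlt_backward l s e hse]

theorem cyclic_slice_changed : Claim_changed_cyclic_slice := by
  unfold Claim_changed_cyclic_slice
  refine ⟨by decide, by decide, by decide, ?_, by decide, by decide⟩
  show cyclic_slice [1, 2] 3 5 = [1, 2]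
  unfold cyclic_slice
  rw [show (4 : Nat) = 2 + 2 from rfl,
      pvCore_forward 2 [1, 2] 3 5 (by decide) (by decide)]
  decide

theorem cyclic_slice_tight : Claim_exact_cyclic_slice := by
  intro l s e _ hpre hd
  have hl : l ≠ [] := hpre
  have hlen : 0 < l.length := List.length_pos_iff.mpr hl
  simp only [D_cyclic_slice] at hd
  by_cases hse : e ≥ s
  · rw [if_pos hse, if_pos hse] at hd
    obtain ⟨hmin, hrot⟩ := hd
    have h3 : pvRot l (PySem.Int.mod s (l.length : Int)) ≠ l := by
      rwa [pvRot_rotate l hl s (by omega)]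
    unfold cyclic_slice
    rw [show (4 : Nat) = 2 + 2 from rfl, pvAlt_forward l s e hse]
    exact pvDisagree_core 2 l s e hl (by omega) (by omega) (by omega) h3
  · rw [if_neg hse, if_neg hse] at hd
    obtain ⟨hmin, hrot⟩ := hd
    have hlr : l.reverse ≠ [] := by simpa using hl
    have h3 : pvRot l.reverse (PySem.Int.mod ((l.length : Int) - s - 1) (l.reverse.length : Int)) ≠ l.reverse := by
      rwa [pvRot_rotate l.reverse hlr _ (by omega)]
    unfold cyclic_slice
    rw [show (4 : Nat) = 3 + 1 from rfl, pvCore, if_neg hse]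
    simp only
    rw [show (3 : Nat) = 1 + 2 from rfl, pvAlt_backward l s e hse]
    exact pvDisagree_core 1 l.reverse ((l.length : Int) - s - 1) ((l.length : Int) - e - 1)
      hlr (by omega) (by simp; omega) (by simp; omega) h3
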